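-- pv_equiv track=rewrite | github.com/alan-turing-institute/rPSMF | pypsmf/psmf/tracking.py | _plot_dims
-- ===== SOURCE A (Python) =====
-- def _plot_dims(n):
--     """Given n plots, find a pleasing 2-D arrangement"""
--     factors = []
--     for i in reversed(range(1, n + 1)):
--         if n % i == 0:
--             factors.append(i)
--
--     diffs = {}
--     for i in range(len(factors)):
--         a = factors[i]
--         for j in range(i + 1, len(factors)):
--             b = factors[j]
--             if a * b == n:
--                 diffs[(a, b)] = abs(a - b)
--     return min(diffs, key=diffs.get)
-- ===== SOURCE B (Python) =====
-- def _plot_dims(n):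
--     """Given n plots, find a pleasing 2-D arrangement"""
--     b, k = 1, 1
--     while k * k <= n:
--         if n % k == 0:
--             b = k
--         k += 1
--     return (n // b, b)
-- ===== Notes on version B (the rewrite author's own statement) =====
-- stated objective: faster
-- what changed: Instead of listing every divisor of n and minimizing |a-b| over all ordered factor pairs, B scans k = 1..isqrt(n) once keeping the largest divisor b <= sqrt(n) and returns (n//b, b).
-- intended difference: For perfect squares n >= 2 A's pair loop requires two distinct divisors so it skips (sqrt(n), sqrt(n)) and returns the best unequal pair (e.g. (4,1) for n=4), while B returns (sqrt(n), sqrt(n)), the most pleasing arrangement the function's docstring asks for. — e.g. on _plot_dims(4): A returns [4, 1], B returns [2, 2]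
import Mathlib
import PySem

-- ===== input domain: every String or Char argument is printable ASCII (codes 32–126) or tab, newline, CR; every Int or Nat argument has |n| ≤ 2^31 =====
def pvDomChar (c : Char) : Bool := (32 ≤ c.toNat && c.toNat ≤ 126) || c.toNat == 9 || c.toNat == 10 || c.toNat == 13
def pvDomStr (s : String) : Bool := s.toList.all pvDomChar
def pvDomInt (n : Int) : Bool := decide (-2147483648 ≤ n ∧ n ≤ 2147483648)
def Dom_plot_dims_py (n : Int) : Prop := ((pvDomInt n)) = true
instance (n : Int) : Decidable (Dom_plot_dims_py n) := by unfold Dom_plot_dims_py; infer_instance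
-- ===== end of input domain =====

-- B replaces A's full divisor enumeration + pairwise search by a single scan of 1..isqrt(n)
-- keeping the largest divisor b ≤ √n; on perfect squares B returns the (√n, √n) arrangement
-- A's distinct-pair loop skips (see D_ below).

-- ===== PORT A =====
def plot_dims_py (n : Int) : List Int :=
  -- factors: divisors of n collected from n down to 1
  let factors : List Int :=
    ((PySem.List.pyRange 1 (n + 1) 1).reverse).foldl
      (fun acc i => if PySem.Int.mod n i == 0 then acc ++ [i] else acc) []
  -- diffs[(a, b)] = abs(a - b) for every ordered factor pair a*b == n
  let diffs : PySem.Dict (Int × Int) Int :=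
    (PySem.List.pyRange 0 (PySem.List.len factors) 1).foldl
      (fun d i =>
        let a := PySem.List.pyGetD factors i 0
        (PySem.List.pyRange (i + 1) (PySem.List.len factors) 1).foldl
          (fun d j =>
            let b := PySem.List.pyGetD factors j 0
            if a * b == n then d.insert (a, b) |a - b| else d) d)
      PySem.Dict.empty
  -- min(diffs, key=diffs.get): diffs.get k is the stored value for every key k, ported as getD
  match PySem.List.min? diffs.keys (fun k => diffs.getD k 0) with
  | some (a, b) => [a, b]
  | none => []   -- Python raises ValueError here (diffs empty); excluded by Pre_

-- ===== PORT B =====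
-- while k*k <= n: if n % k == 0: b = k; k += 1
-- (fuel makes the while-loop structural; n.toNat + 1 steps always suffice since k only grows)
def pvAltGo (n : Int) : Nat → Int → Int → Int
  | 0, b, _ => b
  | f + 1, b, k =>
    if k * k ≤ n then
      pvAltGo n f (if PySem.Int.mod n k == 0 then k else b) (k + 1)
    else b

def plot_dims_py_alt (n : Int) : List Int :=
  let b := pvAltGo n (n.toNat + 1) 1 1
  [PySem.Int.floordiv n b, b]

-- ===== PRECONDITION & SPEC =====
-- Pre_ excludes exactly n ≤ 1, where A's diffs dict is empty and min() raises ValueError.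
def Pre_plot_dims_py (n : Int) : Prop := 2 ≤ n
instance (n : Int) : Decidable (Pre_plot_dims_py n) := by unfold Pre_plot_dims_py; infer_instance
def pvWitness_plot_dims_py : Int := (6)

-- On perfect squares n ≥ 2, A's pair loop only considers pairs of two DISTINCT divisors, so it
-- skips (√n, √n) and returns the closest unequal pair (e.g. (4,1) for n=4), while B returns
-- (√n, √n), the most pleasing arrangement the docstring asks for.
def D_plot_dims_py (n : Int) : Prop := 2 ≤ n ∧ Int.sqrt n * Int.sqrt n = n
instance (n : Int) : Decidable (D_plot_dims_py n) := by unfold D_plot_dims_py; infer_instance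
def Spec_plot_dims_py (n : Int) (out : List Int) : Prop := ¬ D_plot_dims_py n → out = plot_dims_py_alt n
instance (n : Int) (out : List Int) : Decidable (Spec_plot_dims_py n out) := by unfold Spec_plot_dims_py; infer_instance
def pvDiffWitness_plot_dims_py : Int := (4)
def pvDiffWitnessOut_plot_dims_py : (List Int) × (List Int) := ([4, 1], [2, 2])

-- ===== CLAIM (what is proved, stated in full; the proofs are below) =====
def Claim_unchanged_plot_dims_py : Prop := ∀ (n : Int), Dom_plot_dims_py n → Pre_plot_dims_py n → Spec_plot_dims_py n (plot_dims_py n)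
def Claim_changed_plot_dims_py : Prop := Dom_plot_dims_py (pvDiffWitness_plot_dims_py) ∧ Pre_plot_dims_py (pvDiffWitness_plot_dims_py) ∧ D_plot_dims_py (pvDiffWitness_plot_dims_py) ∧ plot_dims_py (pvDiffWitness_plot_dims_py) = pvDiffWitnessOut_plot_dims_py.1 ∧ plot_dims_py_alt (pvDiffWitness_plot_dims_py) = pvDiffWitnessOut_plot_dims_py.2 ∧ pvDiffWitnessOut_plot_dims_py.1 ≠ pvDiffWitnessOut_plot_dims_py.2
def Claim_exact_plot_dims_py : Prop := ∀ (n : Int), Dom_plot_dims_py n → Pre_plot_dims_py n → D_plot_dims_py n → plot_dims_py n ≠ plot_dims_py_alt n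

-- ===== LEMMAS AND PROOFS =====

-- ascending list of the positive divisors of n
def pvDivs (n : Int) : List Int :=
  (PySem.List.pyRange 1 (n + 1) 1).filter (fun i => PySem.Int.mod n i == 0)

-- A's inner loop body over a tail t, for a fixed outer element a
def pvStep (n : Int) (d : PySem.Dict (Int × Int) Int) (a : Int) (t : List Int) :
    PySem.Dict (Int × Int) Int :=
  t.foldl (fun d b => if a * b == n then d.insert (a, b) |a - b| else d) d

-- A's double loop, phrased structurally: fold over the successive tails of factors
def pvTailsFold (n : Int) : List Int → PySem.Dict (Int × Int) Int → PySem.Dict (Int × Int) Int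
  | [], d => d
  | a :: t, d => pvTailsFold n t (pvStep n d a t)

-- the (key, value) pairs the double loop inserts, in insertion order
def pvPairs (n : Int) : List Int → List ((Int × Int) × Int)
  | [] => []
  | a :: t =>
    (match t.find? (fun b => a * b == n) with
     | some c => [((a, c), |a - c|)]
     | none => []) ++ pvPairs n t

theorem pv_mod_eq_zero_iff (a b : Int) (hb : 0 < b) : (PySem.Int.mod a b = 0) ↔ b ∣ a := by
  show Int.fmod a b = 0 ↔ b ∣ a
  rw [Int.fmod_eq_emod, if_pos (Or.inl hb.le), add_zero]
  exact ⟨Int.dvd_of_emod_eq_zero, Int.emod_eq_zero_of_dvd⟩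

theorem pv_mem_pvDivs (n x : Int) : x ∈ pvDivs n ↔ 1 ≤ x ∧ x ≤ n ∧ x ∣ n := by
  unfold pvDivs
  rw [List.mem_filter, PySem.List.mem_pyRange_one]
  constructor
  · rintro ⟨⟨h1, h2⟩, h3⟩
    exact ⟨h1, by omega, (pv_mod_eq_zero_iff n x (by omega)).1 (by simpa using h3)⟩
  · rintro ⟨h1, h2, h3⟩
    exact ⟨⟨h1, by omega⟩, by simpa using (pv_mod_eq_zero_iff n x (by omega)).2 h3⟩

theorem pv_pairwise_pvDivs (n : Int) : (pvDivs n).Pairwise (· < ·) := by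
  unfold pvDivs
  exact (PySem.List.pairwise_lt_pyRange_one 1 (n + 1)).filter _

theorem pv_factors_eq (n : Int) :
    ((PySem.List.pyRange 1 (n + 1) 1).reverse).foldl
      (fun acc i => if PySem.Int.mod n i == 0 then acc ++ [i] else acc) [] = (pvDivs n).reverse := by
  rw [PySem.List.foldl_append_if_eq_filter, List.filter_reverse, List.nil_append]
  rfl

theorem pv_outer_aux (n : Int) (l : List Int) (k : Nat) (d : PySem.Dict (Int × Int) Int) :
    (PySem.List.pyRange (k : Int) (PySem.List.len l) 1).foldl
      (fun d i =>
        (PySem.List.pyRange (i + 1) (PySem.List.len l) 1).foldl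
          (fun d j =>
            if PySem.List.pyGetD l i 0 * PySem.List.pyGetD l j 0 == n then
              d.insert (PySem.List.pyGetD l i 0, PySem.List.pyGetD l j 0)
                |PySem.List.pyGetD l i 0 - PySem.List.pyGetD l j 0|
            else d) d) d
    = pvTailsFold n (l.drop k) d := by
  induction hm : l.length - k generalizing k d with
  | zero =>
    have hk : l.length ≤ k := by omega
    rw [PySem.List.pyRange_one_eq_nil (by simp [PySem.List.len]; exact_mod_cast hk),
        List.drop_eq_nil_of_le hk]
    rfl
  | succ m ih =>
    have hk : k < l.length := by omega
    rw [PySem.List.pyRange_one_cons (by simp [PySem.List.len]; exact_mod_cast hk), List.foldl_cons]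
    have hget : PySem.List.pyGetD l (k : Int) 0 = l[k] :=
      PySem.List.pyGetD_eq_getElem l 0 (by positivity) (by exact_mod_cast hk)
    have htn : ((k : Int) + 1).toNat = k + 1 := by omega
    have hinner :
        (PySem.List.pyRange ((k : Int) + 1) (PySem.List.len l) 1).foldl
          (fun d j =>
            if PySem.List.pyGetD l (k : Int) 0 * PySem.List.pyGetD l j 0 == n then
              d.insert (PySem.List.pyGetD l (k : Int) 0, PySem.List.pyGetD l j 0)
                |PySem.List.pyGetD l (k : Int) 0 - PySem.List.pyGetD l j 0|
            else d) d
        = pvStep n d (l[k]) (l.drop (k + 1)) := by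
      have h := PySem.List.foldl_pyRange_pyGetD l 0
        (fun d b => if l[k] * b == n then d.insert (l[k], b) |l[k] - b| else d) d
        (a := (k : Int) + 1) (by positivity)
      rw [htn] at h
      rw [hget]
      exact h
    rw [hinner, List.drop_eq_getElem_cons hk]
    show List.foldl _ _ _ = pvTailsFold n (l[k] :: l.drop (k + 1)) d
    have hcast : ((k : Int) + 1) = (((k + 1 : Nat)) : Int) := by push_cast; ring
    rw [hcast]
    exact ih (k + 1) _ (by omega)

theorem pv_outer_eq (n : Int) (l : List Int) (d : PySem.Dict (Int × Int) Int) :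
    (PySem.List.pyRange 0 (PySem.List.len l) 1).foldl
      (fun d i =>
        (PySem.List.pyRange (i + 1) (PySem.List.len l) 1).foldl
          (fun d j =>
            if PySem.List.pyGetD l i 0 * PySem.List.pyGetD l j 0 == n then
              d.insert (PySem.List.pyGetD l i 0, PySem.List.pyGetD l j 0)
                |PySem.List.pyGetD l i 0 - PySem.List.pyGetD l j 0|
            else d) d) d
    = pvTailsFold n l d := by
  have h := pv_outer_aux n l 0 d
  simpa using h

theorem pv_step_id (n a : Int) (t : List Int) (d : PySem.Dict (Int × Int) Int)
    (h : ∀ b ∈ t, ¬ a * b = n) : pvStep n d a t = d := by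
  induction t generalizing d with
  | nil => rfl
  | cons b t ih =>
    show pvStep n d a (b :: t) = d
    unfold pvStep
    rw [List.foldl_cons, if_neg (by simpa using h b (List.mem_cons_self))]
    exact ih d (fun x hx => h x (List.mem_cons_of_mem _ hx))

theorem pv_step_eq (n a : Int) (t : List Int) (d : PySem.Dict (Int × Int) Int)
    (ha : a ≠ 0) (hnd : t.Nodup) :
    pvStep n d a t = match t.find? (fun b => a * b == n) with
      | some c => d.insert (a, c) |a - c|
      | none => d := by
  induction t generalizing d with
  | nil => rfl
  | cons b t ih =>
    obtain ⟨hbt, hnd2⟩ := List.nodup_cons.mp hnd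
    by_cases hb : a * b = n
    · rw [List.find?_cons_of_pos (by simpa using hb)]
      show pvStep n d a (b :: t) = d.insert (a, b) |a - b|
      unfold pvStep
      rw [List.foldl_cons, if_pos (by simpa using hb)]
      refine pv_step_id n a t _ ?_
      intro x hx hax
      exact hbt ((mul_left_cancel₀ ha (hax.trans hb.symm)) ▸ hx)
    · rw [List.find?_cons_of_neg (by simpa using hb)]
      show pvStep n d a (b :: t) = _
      unfold pvStep
      rw [List.foldl_cons, if_neg (by simpa using hb)]
      exact ih d hnd2

theorem pv_items_insert_fresh (d : PySem.Dict (Int × Int) Int) (k : Int × Int) (v : Int)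
    (h : d.contains k = false) : (d.insert k v).items = d.items ++ [(k, v)] := by
  simp [PySem.Dict.insert, h]

theorem pv_tails_items (n : Int) (l : List Int) (d : PySem.Dict (Int × Int) Int)
    (hnd : l.Nodup) (hpos : ∀ a ∈ l, 1 ≤ a) (hfresh : ∀ p ∈ d.items, p.1.1 ∉ l) :
    (pvTailsFold n l d).items = d.items ++ pvPairs n l := by
  induction l generalizing d with
  | nil => simp [pvTailsFold, pvPairs]
  | cons a t ih =>
    obtain ⟨hat, hnd2⟩ := List.nodup_cons.mp hnd
    have ha1 : (1 : Int) ≤ a := hpos a (List.mem_cons_self)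
    show (pvTailsFold n t (pvStep n d a t)).items = _
    cases hfind : t.find? (fun b => a * b == n) with
    | none =>
      rw [pv_step_eq n a t d (by omega) hnd2]
      simp only [hfind]
      rw [ih _ hnd2 (fun x hx => hpos x (List.mem_cons_of_mem _ hx))
            (fun p hp hmem => hfresh p hp (List.mem_cons_of_mem _ hmem))]
      simp [pvPairs, hfind]
    | some c =>
      have hcont : d.contains (a, c) = false := by
        by_contra hc
        have hc2 : d.contains (a, c) = true := by simpa using hc
        have hk : (a, c) ∈ d.keys := (PySem.Dict.contains_iff_mem_keys d (a, c)).1 hc2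
        obtain ⟨p, hp, hpe⟩ := List.mem_map.mp hk
        refine hfresh p hp ?_
        have hpa : p.1.1 = a := by rw [hpe]
        rw [hpa]
        exact List.mem_cons_self
      rw [pv_step_eq n a t d (by omega) hnd2]
      simp only [hfind]
      have hfresh2 : ∀ p ∈ (d.insert (a, c) |a - c|).items, p.1.1 ∉ t := by
        intro p hp
        rw [pv_items_insert_fresh d (a, c) _ hcont] at hp
        rcases List.mem_append.mp hp with h1 | h1
        · exact fun hmem => hfresh p h1 (List.mem_cons_of_mem _ hmem)
        · have hpe : p = ((a, c), |a - c|) := by simpa using h1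
          subst hpe
          simpa using hat
      rw [ih _ hnd2 (fun x hx => hpos x (List.mem_cons_of_mem _ hx)) hfresh2]
      rw [pv_items_insert_fresh d (a, c) _ hcont]
      simp [pvPairs, hfind]

theorem pv_div_facts (n x : Int) (hn : 2 ≤ n) (hx : x ∣ n) (h1 : 1 ≤ x) (h2 : x ≤ n) :
    x * (n / x) = n ∧ 1 ≤ n / x ∧ n / x ≤ n ∧ (n / x) ∣ n := by
  have hu : x * (n / x) = n := Int.mul_ediv_cancel' hx
  have hu1 : 1 ≤ n / x := by
    by_contra hc
    have hc2 : n / x ≤ 0 := by omega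
    have hnp : x * (n / x) ≤ 0 := mul_nonpos_iff.mpr (Or.inl ⟨by omega, hc2⟩)
    omega
  refine ⟨hu, hu1, by nlinarith, ⟨x, by rw [mul_comm, hu]⟩⟩

theorem pv_div_lt (n a b : Int) (hn : 2 ≤ n) (hab : b < a)
    (ha : a ∣ n) (hb : b ∣ n) (ha1 : 1 ≤ a) (hb1 : 1 ≤ b) (han : a ≤ n) (hbn : b ≤ n) :
    n / a < n / b := by
  obtain ⟨hua, hua1, -, -⟩ := pv_div_facts n a hn ha ha1 han
  obtain ⟨hub, hub1, -, -⟩ := pv_div_facts n b hn hb hb1 hbn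
  by_contra hc
  push_neg at hc
  have h1 : b * (n / b) ≤ b * (n / a) := mul_le_mul_of_nonneg_left hc (by omega)
  have h2 : b * (n / a) < a * (n / a) := mul_lt_mul_of_pos_right hab (by omega)
  omega

theorem pv_no_sqrt (n d : Int) (hd : 1 ≤ d) (hsq : Int.sqrt n * Int.sqrt n ≠ n) : d * d ≠ n := by
  intro h
  apply hsq
  have hd0 : (0 : ℤ) ≤ d := by omega
  have hsn : Int.sqrt n = d := by
    show ((Nat.sqrt (Int.toNat n) : Nat) : Int) = d
    have hcast : n = ((d.toNat ^ 2 : Nat) : Int) := by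
      push_cast [Int.toNat_of_nonneg hd0]
      rw [← h]
      ring
    rw [hcast, Int.toNat_natCast, Nat.sqrt_eq']
    exact Int.toNat_of_nonneg hd0
  rw [hsn]
  exact h

theorem pv_pairs_spec (n : Int) (l : List Int) (hn : 2 ≤ n)
    (hd : l.Pairwise (· > ·))
    (hx : ∀ x ∈ l, x ∣ n ∧ 1 ≤ x ∧ x ≤ n)
    (hcl : ∀ x ∈ l, n < x * x → n / x ∈ l) :
    pvPairs n l = (l.filter (fun a => decide (n < a * a))).map (fun a => ((a, n / a), a - n / a)) := by
  induction l with
  | nil => simp [pvPairs]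
  | cons a t ih =>
    obtain ⟨hdat, hdt⟩ := List.pairwise_cons.mp hd
    obtain ⟨hadvd, ha1, han⟩ := hx a List.mem_cons_self
    have hx2 : ∀ x ∈ t, x ∣ n ∧ 1 ≤ x ∧ x ≤ n := fun x hx0 => hx x (List.mem_cons_of_mem _ hx0)
    have hcl2 : ∀ x ∈ t, n < x * x → n / x ∈ t := by
      intro x hxt hxx
      have hmem := hcl x (List.mem_cons_of_mem _ hxt) hxx
      obtain ⟨hxd, hx1, hxn⟩ := hx2 x hxt
      have hxu : x * (n / x) = n := Int.mul_ediv_cancel' hxd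
      have hux : n / x < x := lt_of_mul_lt_mul_left (by rw [hxu]; exact hxx) (by omega)
      have hxa : x < a := hdat x hxt
      rcases List.mem_cons.mp hmem with h1 | h1
      · omega
      · exact h1
    by_cases hbig : n < a * a
    · obtain ⟨hu, hu1, hun, hud⟩ := pv_div_facts n a hn hadvd ha1 han
      have hua : n / a < a := lt_of_mul_lt_mul_left (by rw [hu]; exact hbig) (by omega)
      have humem : n / a ∈ t := by
        have hmem := hcl a List.mem_cons_self hbig
        rcases List.mem_cons.mp hmem with h1 | h1
        · omega
        · exact h1
      have hfind : t.find? (fun b => a * b == n) = some (n / a) := by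
        cases hf : t.find? (fun b => a * b == n) with
        | none =>
          exfalso
          have hno := List.find?_eq_none.mp hf (n / a) humem
          simp [hu] at hno
        | some c =>
          have hc : a * c = n := by simpa using List.find?_some hf
          have hce : c = n / a := mul_left_cancel₀ (by omega : a ≠ 0) (by rw [hu, hc])
          rw [hce]
      simp only [pvPairs, hfind]
      rw [List.filter_cons_of_pos (by simpa using hbig), List.map_cons]
      rw [ih hdt hx2 hcl2]
      simp [abs_of_nonneg (show (0 : ℤ) ≤ a - n / a by omega)]
    · have hfind : t.find? (fun b => a * b == n) = none := by
        rw [List.find?_eq_none]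
        intro b hbt
        have hba : b < a := hdat b hbt
        obtain ⟨-, hb1, -⟩ := hx2 b hbt
        have hlt : a * b < a * a := mul_lt_mul_of_pos_left hba (by omega)
        simp only [beq_iff_eq]
        omega
      simp only [pvPairs, hfind]
      rw [List.filter_cons_of_neg (by simpa using hbig)]
      simpa using ih hdt hx2 hcl2

theorem pv_min_eq_getLast {α : Type} (l : List α) (key : α → Int) (hne : l ≠ [])
    (hp : l.Pairwise (fun x y => key y < key x)) :
    PySem.List.min? l key = some (l.getLast hne) := by
  cases hmin : PySem.List.min? l key with
  | none => exact absurd ((PySem.List.min?_eq_none_iff l key).mp hmin) hne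
  | some m =>
    have hmem := PySem.List.min?_mem hmin
    have hmin2 := PySem.List.min?_isMin hmin
    obtain ⟨i, hi, hie⟩ := List.getElem_of_mem hmem
    have hlen : 0 < l.length := List.length_pos_iff.mpr hne
    rw [List.getLast_eq_getElem hne]
    by_cases hil : i = l.length - 1
    · subst hil
      rw [← hie]
    · exfalso
      have hplt := List.pairwise_iff_getElem.mp hp i (l.length - 1) hi (by omega) (by omega)
      rw [hie] at hplt
      have hle := hmin2 (l[l.length - 1]'(by omega)) (List.getElem_mem _)
      omega

theorem pv_sq_le (k n : Int) (hk : 1 ≤ k) : k * k ≤ n ↔ k ≤ Int.sqrt n := by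
  by_cases hn : 0 ≤ n
  · lift n to ℕ using hn with m
    lift k to ℕ using (by omega : (0 : ℤ) ≤ k) with a
    show (a : ℤ) * a ≤ m ↔ (a : ℤ) ≤ ((Nat.sqrt (Int.toNat (m : ℤ)) : Nat) : ℤ)
    rw [Int.toNat_natCast]
    constructor
    · intro h
      have h2 : a * a ≤ m := by exact_mod_cast h
      exact_mod_cast Nat.le_sqrt.mpr h2
    · intro h
      have h2 : a ≤ Nat.sqrt m := by exact_mod_cast h
      exact_mod_cast Nat.le_sqrt.mp h2
  · push_neg at hn
    constructor
    · intro h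
      nlinarith
    · intro h
      exfalso
      have ht : n.toNat = 0 := by omega
      have hs : Int.sqrt n = 0 := by
        show ((Nat.sqrt (Int.toNat n) : Nat) : ℤ) = 0
        rw [ht]
        simp
      omega

theorem pv_altLoop_eq (n b k : Int) (f : Nat) (hk : 1 ≤ k) (hf : (Int.sqrt n + 1 - k).toNat ≤ f) :
    pvAltGo n f b k =
      ((PySem.List.pyRange k (Int.sqrt n + 1) 1).filter (fun d => PySem.Int.mod n d == 0)).getLastD b := by
  induction f generalizing b k with
  | zero =>
    have hle : Int.sqrt n + 1 ≤ k := by omega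
    rw [PySem.List.pyRange_one_eq_nil hle]
    rfl
  | succ f ih =>
    by_cases hkn : k * k ≤ n
    · have hks : k ≤ Int.sqrt n := (pv_sq_le k n hk).mp hkn
      rw [PySem.List.pyRange_one_cons (by omega), List.filter_cons]
      show (if k * k ≤ n then pvAltGo n f (if PySem.Int.mod n k == 0 then k else b) (k + 1) else b) = _
      rw [if_pos hkn]
      cases hm : (PySem.Int.mod n k == 0) with
      | true =>
        rw [if_pos rfl, if_pos rfl, List.getLastD_cons]
        exact ih k (k + 1) (by omega) (by omega)
      | false =>
        rw [if_neg (by simp), if_neg (by simp)]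
        exact ih b (k + 1) (by omega) (by omega)
    · have hks : Int.sqrt n < k := by
        by_contra hc
        push_neg at hc
        exact hkn ((pv_sq_le k n hk).mpr hc)
      show (if k * k ≤ n then pvAltGo n f (if PySem.Int.mod n k == 0 then k else b) (k + 1) else b) = _
      rw [if_neg hkn, PySem.List.pyRange_one_eq_nil (by omega)]
      rfl

theorem pv_small_eq (n : Int) (hn : 1 ≤ n) :
    (PySem.List.pyRange 1 (Int.sqrt n + 1) 1).filter (fun d => PySem.Int.mod n d == 0)
      = (pvDivs n).filter (fun d => decide (d * d ≤ n)) := by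
  have h0 : 0 ≤ Int.sqrt n := Int.sqrt_nonneg n
  have h2 : Int.sqrt n ≤ n := by
    show ((Nat.sqrt (Int.toNat n) : Nat) : ℤ) ≤ n
    calc ((Nat.sqrt (Int.toNat n) : Nat) : ℤ) ≤ ((Int.toNat n : Nat) : ℤ) := by
          exact_mod_cast Nat.sqrt_le_self n.toNat
      _ = n := Int.toNat_of_nonneg (by omega)
  unfold pvDivs
  rw [PySem.List.pyRange_one_append 1 (Int.sqrt n + 1) (n + 1) (by omega) (by omega)]
  rw [List.filter_append, List.filter_append]
  have hA : List.filter (fun d => decide (d * d ≤ n))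
      (List.filter (fun i => PySem.Int.mod n i == 0) (PySem.List.pyRange 1 (Int.sqrt n + 1) 1))
      = List.filter (fun i => PySem.Int.mod n i == 0) (PySem.List.pyRange 1 (Int.sqrt n + 1) 1) := by
    rw [List.filter_eq_self]
    intro d hd
    have hrange := PySem.List.mem_pyRange_one.mp (List.mem_filter.mp hd).1
    have hdd : d * d ≤ n := (pv_sq_le d n (by omega)).mpr (by omega)
    simpa using hdd
  have hB : List.filter (fun d => decide (d * d ≤ n))
      (List.filter (fun i => PySem.Int.mod n i == 0) (PySem.List.pyRange (Int.sqrt n + 1) (n + 1) 1))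
      = [] := by
    rw [List.filter_eq_nil_iff]
    intro d hd
    have hrange := PySem.List.mem_pyRange_one.mp (List.mem_filter.mp hd).1
    simp only [decide_eq_true_eq]
    intro hdd
    have := (pv_sq_le d n (by omega)).mp hdd
    omega
  rw [hA, hB, List.append_nil]

theorem pv_getLast_max (l : List Int) (h : l.Pairwise (· < ·)) (hne : l ≠ []) :
    ∀ x ∈ l, x ≤ l.getLast hne := by
  intro x hx
  obtain ⟨i, hi, hie⟩ := List.getElem_of_mem hx
  rw [List.getLast_eq_getElem hne, ← hie]
  by_cases he : i = l.length - 1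
  · subst he
    exact le_rfl
  · exact (List.pairwise_iff_getElem.mp h i (l.length - 1) hi (by omega) (by omega)).le

theorem pv_head_min (l : List Int) (h : l.Pairwise (· < ·)) (hne : l ≠ []) :
    ∀ x ∈ l, l.head hne ≤ x := by
  intro x hx
  obtain ⟨i, hi, hie⟩ := List.getElem_of_mem hx
  rw [List.head_eq_getElem hne, ← hie]
  by_cases he : i = 0
  · subst he
    exact le_rfl
  · exact (List.pairwise_iff_getElem.mp h 0 i (by omega) hi (by omega)).le

-- characterization of A for every n ≥ 2: A returns [a0, n/a0], a0 the least divisor with a0² > n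
theorem pv_A_char (n : Int) (hn : 2 ≤ n)
    (hne : (pvDivs n).filter (fun a => decide (n < a * a)) ≠ []) :
    plot_dims_py n =
      [((pvDivs n).filter (fun a => decide (n < a * a))).head hne,
       n / ((pvDivs n).filter (fun a => decide (n < a * a))).head hne] := by
  have hpw := pv_pairwise_pvDivs n
  have hnodup : (pvDivs n).Nodup := by
    unfold pvDivs
    exact List.filter_sublist.nodup (PySem.List.nodup_pyRange_one 1 (n + 1))
  have hFnodup : ((pvDivs n).reverse).Nodup := by
    rw [List.nodup_reverse]
    exact hnodup
  have hFpos : ∀ a ∈ (pvDivs n).reverse, (1 : Int) ≤ a := by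
    intro a ha
    rw [List.mem_reverse] at ha
    exact ((pv_mem_pvDivs n a).mp ha).1
  have hFx : ∀ x ∈ (pvDivs n).reverse, x ∣ n ∧ 1 ≤ x ∧ x ≤ n := by
    intro x hx
    rw [List.mem_reverse] at hx
    obtain ⟨h1, h2, h3⟩ := (pv_mem_pvDivs n x).mp hx
    exact ⟨h3, h1, h2⟩
  have hFdesc : ((pvDivs n).reverse).Pairwise (· > ·) := List.pairwise_reverse.mpr hpw
  have hFcl : ∀ x ∈ (pvDivs n).reverse, n < x * x → n / x ∈ (pvDivs n).reverse := by
    intro x hx _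
    rw [List.mem_reverse] at hx ⊢
    obtain ⟨h1, h2, h3⟩ := (pv_mem_pvDivs n x).mp hx
    obtain ⟨hu, hu1, hun, hud⟩ := pv_div_facts n x hn h3 h1 h2
    exact (pv_mem_pvDivs n (n / x)).mpr ⟨hu1, hun, hud⟩
  have hitems : (pvTailsFold n ((pvDivs n).reverse) PySem.Dict.empty).items
      = pvPairs n ((pvDivs n).reverse) := by
    have h := pv_tails_items n ((pvDivs n).reverse) PySem.Dict.empty hFnodup hFpos
      (by intro p hp; simp [PySem.Dict.empty] at hp)
    simpa using h
  have hpairs : pvPairs n ((pvDivs n).reverse)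
      = (((pvDivs n).filter (fun a => decide (n < a * a))).reverse).map
          (fun a => ((a, n / a), a - n / a)) := by
    rw [pv_pairs_spec n ((pvDivs n).reverse) hn hFdesc hFx hFcl, List.filter_reverse]
  have hkeys : (pvTailsFold n ((pvDivs n).reverse) PySem.Dict.empty).keys
      = (((pvDivs n).filter (fun a => decide (n < a * a))).reverse).map (fun a => (a, n / a)) := by
    show (pvTailsFold n ((pvDivs n).reverse) PySem.Dict.empty).items.map (fun x => x.1) = _
    rw [hitems, hpairs, List.map_map]
    rfl
  set bg := (pvDivs n).filter (fun a => decide (n < a * a)) with hbg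
  have hbgpw : bg.Pairwise (· < ·) := hpw.filter _
  have hbgnodup : bg.Nodup := List.filter_sublist.nodup hnodup
  have hKne : ((bg.reverse).map (fun a => (a, n / a))) ≠ [] := by
    simp only [ne_eq, List.map_eq_nil_iff, List.reverse_eq_nil_iff]
    exact hne
  have hknodup : (pvTailsFold n ((pvDivs n).reverse) PySem.Dict.empty).keys.Nodup := by
    rw [hkeys]
    refine List.Nodup.map ?_ (by rw [List.nodup_reverse]; exact hbgnodup)
    intro x y hxy
    exact congrArg Prod.fst hxy
  have hgetD : ∀ a ∈ bg.reverse,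
      (pvTailsFold n ((pvDivs n).reverse) PySem.Dict.empty).getD (a, n / a) 0 = a - n / a := by
    intro a ha
    refine PySem.Dict.getD_of_mem_items _ ?_ hknodup 0
    rw [hitems, hpairs]
    exact List.mem_map.mpr ⟨a, ha, rfl⟩
  have hmemfacts : ∀ a ∈ bg.reverse, a ∣ n ∧ 1 ≤ a ∧ a ≤ n ∧ n < a * a := by
    intro a ha
    rw [List.mem_reverse, hbg, List.mem_filter] at ha
    obtain ⟨hdv, hlt⟩ := ha
    obtain ⟨h1, h2, h3⟩ := (pv_mem_pvDivs n a).mp hdv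
    exact ⟨h3, h1, h2, by simpa using hlt⟩
  have hrev : (bg.reverse).Pairwise (· > ·) := List.pairwise_reverse.mpr hbgpw
  have hKpw : ((bg.reverse).map (fun a => (a, n / a))).Pairwise
      (fun x y => (fun k => (pvTailsFold n ((pvDivs n).reverse) PySem.Dict.empty).getD k 0) y
        < (fun k => (pvTailsFold n ((pvDivs n).reverse) PySem.Dict.empty).getD k 0) x) := by
    rw [List.pairwise_map]
    refine List.Pairwise.imp_of_mem ?_ hrev
    intro a b ha hb hab
    simp only
    rw [hgetD a ha, hgetD b hb]
    obtain ⟨had, ha1, han, -⟩ := hmemfacts a ha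
    obtain ⟨hbd, hb1, hbn, -⟩ := hmemfacts b hb
    have hdiv := pv_div_lt n a b hn hab had hbd ha1 hb1 han hbn
    omega
  have hmin := pv_min_eq_getLast ((bg.reverse).map (fun a => (a, n / a)))
      (fun k => (pvTailsFold n ((pvDivs n).reverse) PySem.Dict.empty).getD k 0) hKne hKpw
  have hbglen : 0 < bg.length := List.length_pos_iff.mpr hne
  have hlast : ((bg.reverse).map (fun a => (a, n / a))).getLast hKne
      = (bg.head hne, n / bg.head hne) := by
    have hidx : bg.length - 1 - (bg.length - 1) = 0 := by omega
    simp only [List.getLast_eq_getElem, List.length_map, List.length_reverse,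
      List.getElem_map, List.getElem_reverse, hidx, List.head_eq_getElem]
  simp only [plot_dims_py]
  rw [pv_factors_eq, pv_outer_eq, hkeys, hmin, hlast]

-- characterization of B for every n ≥ 2: B returns [n/b0, b0], b0 the largest divisor with b0² ≤ n
theorem pv_B_char (n : Int) (hn : 2 ≤ n)
    (hne : (pvDivs n).filter (fun d => decide (d * d ≤ n)) ≠ []) :
    plot_dims_py_alt n =
      [n / ((pvDivs n).filter (fun d => decide (d * d ≤ n))).getLast hne,
       ((pvDivs n).filter (fun d => decide (d * d ≤ n))).getLast hne] := by
  have h0 : 0 ≤ Int.sqrt n := Int.sqrt_nonneg n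
  have h2 : Int.sqrt n ≤ n := by
    show ((Nat.sqrt (Int.toNat n) : Nat) : ℤ) ≤ n
    calc ((Nat.sqrt (Int.toNat n) : Nat) : ℤ) ≤ ((Int.toNat n : Nat) : ℤ) := by
          exact_mod_cast Nat.sqrt_le_self n.toNat
      _ = n := Int.toNat_of_nonneg (by omega)
  have hgo : pvAltGo n (n.toNat + 1) 1 1
      = ((pvDivs n).filter (fun d => decide (d * d ≤ n))).getLastD 1 := by
    rw [pv_altLoop_eq n 1 1 (n.toNat + 1) (le_refl 1) (by omega)]
    rw [pv_small_eq n (by omega)]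
  have hlastD : ((pvDivs n).filter (fun d => decide (d * d ≤ n))).getLastD 1
      = ((pvDivs n).filter (fun d => decide (d * d ≤ n))).getLast hne := by
    rw [List.getLastD_eq_getLast?, List.getLast?_eq_some_getLast hne]
    rfl
  have hmem := List.getLast_mem hne
  rw [List.mem_filter] at hmem
  obtain ⟨hdv, -⟩ := hmem
  obtain ⟨hb1, -, -⟩ := (pv_mem_pvDivs n _).mp hdv
  have hfd : PySem.Int.floordiv n (((pvDivs n).filter (fun d => decide (d * d ≤ n))).getLast hne)
      = n / (((pvDivs n).filter (fun d => decide (d * d ≤ n))).getLast hne) := by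
    show Int.fdiv n _ = _
    rw [Int.fdiv_eq_ediv, if_pos (Or.inl (by omega)), sub_zero]
  simp only [plot_dims_py_alt]
  rw [hgo, hlastD, hfd]

theorem pv_big_ne (n : Int) (hn : 2 ≤ n) :
    (pvDivs n).filter (fun a => decide (n < a * a)) ≠ [] := by
  refine List.ne_nil_of_mem (a := n) ?_
  rw [List.mem_filter]
  refine ⟨(pv_mem_pvDivs n n).mpr ⟨by omega, le_refl n, dvd_refl n⟩, ?_⟩
  simp only [decide_eq_true_eq]
  nlinarith

theorem pv_small_ne (n : Int) (hn : 2 ≤ n) :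
    (pvDivs n).filter (fun d => decide (d * d ≤ n)) ≠ [] := by
  refine List.ne_nil_of_mem (a := 1) ?_
  rw [List.mem_filter]
  refine ⟨(pv_mem_pvDivs n 1).mpr ⟨le_refl 1, by omega, one_dvd n⟩, ?_⟩
  simp only [decide_eq_true_eq]
  omega

-- ===== VERDICT (by name: the statement is the Claim_ definition above) =====
theorem plot_dims_py_spec : Claim_unchanged_plot_dims_py := by
  unfold Claim_unchanged_plot_dims_py
  intro n _ hpre
  unfold Spec_plot_dims_py
  intro hD
  unfold Pre_plot_dims_py at hpre
  unfold D_plot_dims_py at hD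
  have hsq : Int.sqrt n * Int.sqrt n ≠ n := fun hc => hD ⟨hpre, hc⟩
  have hpw := pv_pairwise_pvDivs n
  have hbne := pv_big_ne n hpre
  have hsne := pv_small_ne n hpre
  rw [pv_A_char n hpre hbne, pv_B_char n hpre hsne]
  set a0 := ((pvDivs n).filter (fun a => decide (n < a * a))).head hbne with ha0def
  set b0 := ((pvDivs n).filter (fun d => decide (d * d ≤ n))).getLast hsne with hb0def
  have ha0mem := List.head_mem hbne
  rw [List.mem_filter] at ha0mem
  obtain ⟨ha0dv, ha0big'⟩ := ha0mem
  obtain ⟨ha01, ha0n, ha0d⟩ := (pv_mem_pvDivs n a0).mp ha0dv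
  have ha0big : n < a0 * a0 := of_decide_eq_true ha0big'
  have hb0mem := List.getLast_mem hsne
  rw [List.mem_filter] at hb0mem
  obtain ⟨hb0dv, hb0sq'⟩ := hb0mem
  obtain ⟨hb01, hb0n, hb0d⟩ := (pv_mem_pvDivs n b0).mp hb0dv
  have hb0sq : b0 * b0 ≤ n := of_decide_eq_true hb0sq'
  have ha0min := pv_head_min _ (hpw.filter _) hbne
  have hb0max := pv_getLast_max _ (hpw.filter _) hsne
  obtain ⟨hub, hub1, hubn, hubd⟩ := pv_div_facts n b0 hpre hb0d hb01 hb0n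
  obtain ⟨hua, hua1, huan, huad⟩ := pv_div_facts n a0 hpre ha0d ha01 ha0n
  have hb0s : b0 * b0 < n := lt_of_le_of_ne hb0sq (pv_no_sqrt n b0 hb01 hsq)
  have hcs : n < (n / b0) * (n / b0) := by
    by_contra hc
    have hcs2 : (n / b0) * (n / b0) < n :=
      lt_of_le_of_ne (by omega) (pv_no_sqrt n (n / b0) hub1 hsq)
    have hmul : (b0 * b0) * ((n / b0) * (n / b0)) < n * n :=
      mul_lt_mul'' hb0s hcs2 (by positivity) (by positivity)
    have hsq2 : (b0 * b0) * ((n / b0) * (n / b0)) = n * n := by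
      calc (b0 * b0) * ((n / b0) * (n / b0)) = (b0 * (n / b0)) * (b0 * (n / b0)) := by ring
        _ = n * n := by rw [hub]
    omega
  have hcmem : n / b0 ∈ (pvDivs n).filter (fun a => decide (n < a * a)) := by
    rw [List.mem_filter]
    exact ⟨(pv_mem_pvDivs n _).mpr ⟨hub1, hubn, hubd⟩, by simpa using hcs⟩
  have h_a0_le : a0 ≤ n / b0 := ha0min _ hcmem
  have hds : (n / a0) * (n / a0) < n := by
    by_contra hc
    have hc2 : n ≤ (n / a0) * (n / a0) := by omega
    have h1a : n * n ≤ n * ((n / a0) * (n / a0)) := by nlinarith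
    have h1b : n * ((n / a0) * (n / a0)) < (a0 * a0) * ((n / a0) * (n / a0)) :=
      mul_lt_mul_of_pos_right ha0big (by positivity)
    have hsq2 : (a0 * a0) * ((n / a0) * (n / a0)) = n * n := by
      calc (a0 * a0) * ((n / a0) * (n / a0)) = (a0 * (n / a0)) * (a0 * (n / a0)) := by ring
        _ = n * n := by rw [hua]
    omega
  have hdmem : n / a0 ∈ (pvDivs n).filter (fun d => decide (d * d ≤ n)) := by
    rw [List.mem_filter]
    exact ⟨(pv_mem_pvDivs n _).mpr ⟨hua1, huan, huad⟩, by simp only [decide_eq_true_eq]; omega⟩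
  have h_d_le : n / a0 ≤ b0 := hb0max _ hdmem
  have h_le2 : n / b0 ≤ a0 := by
    by_contra hcc
    have hcc2 : a0 < n / b0 := by omega
    have h1 : a0 * (n / a0) < (n / b0) * (n / a0) := mul_lt_mul_of_pos_right hcc2 (by omega)
    have h2 : (n / b0) * (n / a0) ≤ (n / b0) * b0 := mul_le_mul_of_nonneg_left h_d_le (by omega)
    have h3 : (n / b0) * b0 = n := by rw [mul_comm]; exact hub
    omega
  have heq1 : a0 = n / b0 := le_antisymm h_a0_le h_le2
  have heq2 : n / a0 = b0 := by
    rw [heq1]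
    exact Int.ediv_eq_of_eq_mul_left (by omega) hub.symm
  rw [heq2, heq1]

theorem pv_sqrt_four : Int.sqrt 4 = 2 := by
  show ((Nat.sqrt (Int.toNat 4) : Nat) : Int) = 2
  have h4 : Int.toNat 4 = 4 := rfl
  have h : Nat.sqrt 4 = 2 := by norm_num
  rw [h4, h]
  norm_num

theorem plot_dims_py_changed : Claim_changed_plot_dims_py := by
  unfold Claim_changed_plot_dims_py
  have hD : D_plot_dims_py pvDiffWitness_plot_dims_py := by
    unfold D_plot_dims_py pvDiffWitness_plot_dims_py
    refine ⟨by norm_num, ?_⟩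
    rw [pv_sqrt_four]
    norm_num
  exact ⟨by decide, by decide, hD, by decide, by decide, by decide⟩

theorem plot_dims_py_tight : Claim_exact_plot_dims_py := by
  unfold Claim_exact_plot_dims_py
  intro n _ hpre hD
  unfold Pre_plot_dims_py at hpre
  unfold D_plot_dims_py at hD
  obtain ⟨-, hsq⟩ := hD
  have hpw := pv_pairwise_pvDivs n
  have hbne := pv_big_ne n hpre
  have hsne := pv_small_ne n hpre
  rw [pv_A_char n hpre hbne, pv_B_char n hpre hsne]
  set a0 := ((pvDivs n).filter (fun a => decide (n < a * a))).head hbne with ha0def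
  set b0 := ((pvDivs n).filter (fun d => decide (d * d ≤ n))).getLast hsne with hb0def
  have hr0 : 0 ≤ Int.sqrt n := Int.sqrt_nonneg n
  have hr1 : 1 ≤ Int.sqrt n := by nlinarith
  have hrd : Int.sqrt n ∣ n := ⟨Int.sqrt n, hsq.symm⟩
  have hrn : Int.sqrt n ≤ n := by nlinarith
  have hrsm : Int.sqrt n ∈ (pvDivs n).filter (fun d => decide (d * d ≤ n)) := by
    rw [List.mem_filter]
    refine ⟨(pv_mem_pvDivs n _).mpr ⟨hr1, hrn, hrd⟩, ?_⟩
    simp only [decide_eq_true_eq]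
    omega
  have hb0max := pv_getLast_max _ (hpw.filter _) hsne
  have h1 : Int.sqrt n ≤ b0 := hb0max _ hrsm
  have hb0mem := List.getLast_mem hsne
  rw [List.mem_filter] at hb0mem
  obtain ⟨hb0dv, hb0sq'⟩ := hb0mem
  obtain ⟨hb01, hb0n, hb0d⟩ := (pv_mem_pvDivs n b0).mp hb0dv
  have hb0sq : b0 * b0 ≤ n := of_decide_eq_true hb0sq'
  have h2 : b0 ≤ Int.sqrt n := by
    by_contra hc
    have hc2 : Int.sqrt n < b0 := by omega
    have : Int.sqrt n * Int.sqrt n < b0 * b0 := by nlinarith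
    omega
  have hb0r : b0 = Int.sqrt n := le_antisymm h2 h1
  have ha0mem := List.head_mem hbne
  rw [List.mem_filter] at ha0mem
  obtain ⟨ha0dv, ha0big'⟩ := ha0mem
  have ha0big : n < a0 * a0 := of_decide_eq_true ha0big'
  have hnr : n / b0 = Int.sqrt n := by
    rw [hb0r]
    exact Int.ediv_eq_of_eq_mul_left (by omega) hsq.symm
  intro hEq
  have hhead : a0 = n / b0 := by
    have h := congrArg (fun l => l.headI) hEq
    simpa using h
  rw [hnr] at hhead
  rw [hhead] at ha0big
  omega
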